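-- pv_equiv track=rewrite | github.com/NguyenTuKien/ITIS-Python-2025 | Codeptit/ICPC0114.py | check
-- ===== SOURCE A (Python) =====
-- def is_prime(num):
--     if num < 2:
--         return False
--     for i in range(2, int(num**0.5) + 1):
--         if num % i == 0:
--             return False
--     return True
--
-- def check(num):
--     sum = 0
--     for x in num:
--         if not is_prime(int(x)):
--             return False
--         sum += int(x)
--     if is_prime(sum):
--         return True
--     return False
-- ===== SOURCE B (Python) =====
-- def check(num):
--     # every digit must be one of the four prime digits (int(x) raises on a non-digit, like A)
--     if not all(int(x) in (2, 3, 5, 7) for x in num):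
--         return False
--     s = sum(int(x) for x in num)
--     if s < 2:
--         return False
--     return all(s % d != 0 for d in range(2, s))
-- ===== Notes on version B (the rewrite author's own statement) =====
-- stated objective: simpler
-- what changed: B replaces the per-digit is_prime trial-division calls by a direct membership test of each digit value in the set of prime digits, and tests the digit sum for primality with full trial division over range(2, s) instead of sqrt-bounded trial division.
import Mathlib
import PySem

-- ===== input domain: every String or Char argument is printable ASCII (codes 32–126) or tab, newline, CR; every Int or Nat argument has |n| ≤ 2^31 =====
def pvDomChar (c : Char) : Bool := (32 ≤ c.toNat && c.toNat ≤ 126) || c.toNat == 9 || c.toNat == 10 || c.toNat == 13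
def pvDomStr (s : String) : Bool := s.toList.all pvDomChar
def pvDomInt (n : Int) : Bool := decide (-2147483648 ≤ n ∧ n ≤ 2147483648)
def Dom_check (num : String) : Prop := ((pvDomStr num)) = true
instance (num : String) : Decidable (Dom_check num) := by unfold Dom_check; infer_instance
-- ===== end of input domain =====

-- B replaces per-digit is_prime calls by membership of each digit value in the prime-digit set and tests the
-- digit sum with full trial division over range(2, s) instead of sqrt-bounded trial division.

-- ===== PORT A =====
-- integer square root by descending search (hand port of int(num**0.5); exact: for the
-- nonnegative ints reached here int(num**0.5) is the integer square root)
def isqrtDown : Nat → Nat → Nat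
  | 0, _ => 0
  | k+1, n => if (k+1)*(k+1) ≤ n then k+1 else isqrtDown k n
def isqrt (n : Nat) : Nat := isqrtDown n n

def is_prime (num : Int) : Bool :=
  if num < 2 then false
  else
    (PySem.List.pyRange 2 ((isqrt num.toNat : Int) + 1) 1).all
      (fun i => !(PySem.Int.mod num i == 0))

-- the for-loop of check: early return on a non-prime digit, else accumulate the sum
def checkLoop : List Char → Int → Bool
  | [], s => if is_prime s then true else false
  | x :: rest, s =>
    match PySem.Int.ofStr? (String.ofList [x]) with
    | none => false      -- int(x) raises ValueError here; such inputs are outside Pre_check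
    | some v => if !is_prime v then false else checkLoop rest (s + v)

def check (num : String) : Bool := checkLoop num.toList 0

-- ===== PORT B =====
-- all(int(x) in (2, 3, 5, 7) for x in num): lazy, so a non-prime digit stops it
-- before a later non-digit character (exactly as in Source B)
def allPrimeDigit : List Char → Bool
  | [] => true
  | x :: rest =>
    match PySem.Int.ofStr? (String.ofList [x]) with
    | none => false      -- int(x) raises ValueError here; such inputs are outside Pre_check
    | some v => if v ∈ ([2, 3, 5, 7] : List Int) then allPrimeDigit rest else false

def check_alt (num : String) : Bool :=
  if !(allPrimeDigit num.toList) then false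
  else
    -- int(x) never raises here: every character is a prime digit
    let s : Int := num.toList.foldl (fun acc x => acc + (PySem.Int.ofStr? (String.ofList [x])).getD 0) 0
    if s < 2 then false
    else (PySem.List.pyRange 2 s 1).all (fun d => !(PySem.Int.mod s d == 0))

-- ===== PRECONDITION & SPEC =====
-- Pre_check excludes exactly the inputs on which A raises ValueError: those whose first
-- character that is not one of the four prime digits is not an ASCII digit (int(x) fails there).
def Pre_check (num : String) : Prop :=
  ((num.toList.dropWhile (fun c => decide (c ∈ "2357".toList))).take 1).all Char.isDigit = true
instance (num : String) : Decidable (Pre_check num) := by unfold Pre_check; infer_instance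

def pvWitness_check : String := "23525"

def Spec_check (num : String) (out : Bool) : Prop := out = check_alt num
instance (num : String) (out : Bool) : Decidable (Spec_check num out) := by unfold Spec_check; infer_instance

-- ===== CLAIM (what is proved, stated in full; the proofs are below) =====
def Claim_equal_check : Prop := ∀ (num : String), Dom_check num → Pre_check num → Spec_check num (check num)

-- ===== LEMMAS AND PROOFS =====

theorem isqrtDown_eq (k n : Nat) : isqrtDown k n = min k (Nat.sqrt n) := by
  induction k with
  | zero => simp [isqrtDown]
  | succ k ih =>
    rw [isqrtDown]
    by_cases h : (k+1)*(k+1) ≤ n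
    · have h1 : k+1 ≤ Nat.sqrt n := Nat.le_sqrt.mpr h
      simp [h]
      omega
    · have h1 : Nat.sqrt n ≤ k := by
        by_contra hk
        exact h (Nat.le_sqrt.mp (by omega))
      simp [h, ih]
      omega

theorem isqrt_eq (n : Nat) : isqrt n = Nat.sqrt n := by
  rw [isqrt, isqrtDown_eq]
  exact min_eq_right (Nat.sqrt_le_self n)

theorem digit_bounds (c : Char) (h : c.isDigit = true) : 48 ≤ c.toNat ∧ c.toNat ≤ 57 := by
  simp [Char.isDigit] at h
  exact ⟨h.1, h.2⟩

-- int(c) of a single ASCII digit character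
theorem ofStr_digit (c : Char) (h : c.isDigit = true) :
    PySem.Int.ofStr? (String.ofList [c]) = some ((c.toNat : Int) - 48) := by
  obtain ⟨h1, h2⟩ := digit_bounds c h
  rw [← Char.ofNat_toNat c]
  generalize c.toNat = n at *
  interval_cases n <;> decide

theorem nonprime_digit (c : Char) (h : c.isDigit = true) (h2 : ¬ c ∈ ['2','3','5','7']) :
    is_prime ((c.toNat : Int) - 48) = false ∧ ¬ ((c.toNat : Int) - 48) ∈ ([2, 3, 5, 7] : List Int) := by
  obtain ⟨hb1, hb2⟩ := digit_bounds c h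
  rw [← Char.ofNat_toNat c] at h2 ⊢
  generalize c.toNat = n at *
  interval_cases n <;> first | exact ⟨by decide, by decide⟩ | (exact absurd (by decide) h2)

theorem prime_digit_val (c : Char) (h : c ∈ ['2','3','5','7']) :
    PySem.Int.ofStr? (String.ofList [c]) = some ((c.toNat : Int) - 48) ∧
      is_prime ((c.toNat : Int) - 48) = true ∧
      ((c.toNat : Int) - 48) ∈ ([2, 3, 5, 7] : List Int) := by
  fin_cases h <;> exact ⟨by decide, by decide, by decide⟩

-- the all-over-a-range condition as a ∀ over Nat divisors
theorem all_nodiv_iff (n : Nat) (b : Int) :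
    ((PySem.List.pyRange 2 b 1).all (fun i => !(PySem.Int.mod (n : Int) i == 0)) = true) ↔
      ∀ m : Nat, 2 ≤ m → (m : Int) < b → ¬ m ∣ n := by
  rw [List.all_eq_true]
  constructor
  · intro h m hm hmb hd
    have := h (m : Int) (by rw [PySem.List.mem_pyRange_one]; exact ⟨by exact_mod_cast hm, hmb⟩)
    simp only [Bool.not_eq_eq_eq_not, Bool.not_true, beq_eq_false_iff_ne, ne_eq,
      PySem.Int.mod_eq_zero_iff_dvd] at this
    exact this (by exact_mod_cast hd)
  · intro h i hi
    rw [PySem.List.mem_pyRange_one] at hi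
    obtain ⟨h2, hb⟩ := hi
    simp only [Bool.not_eq_eq_eq_not, Bool.not_true, beq_eq_false_iff_ne, ne_eq,
      PySem.Int.mod_eq_zero_iff_dvd]
    intro hd
    lift i to Nat using (by omega) with m
    exact h m (by exact_mod_cast h2) hb (by exact_mod_cast hd)

-- sqrt-bounded trial division agrees with full trial division
theorem is_prime_eq_full (s : Int) :
    is_prime s = (if s < 2 then false
      else (PySem.List.pyRange 2 s 1).all (fun d => !(PySem.Int.mod s d == 0))) := by
  unfold is_prime
  by_cases hs : s < 2
  · simp [hs]
  · simp only [hs, if_false]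
    rw [not_lt] at hs
    obtain ⟨n, rfl⟩ : ∃ n : Nat, s = (n : Int) := ⟨s.toNat, (Int.toNat_of_nonneg (by omega)).symm⟩
    have hn : 2 ≤ n := by exact_mod_cast hs
    rw [Bool.eq_iff_iff, Int.toNat_natCast, isqrt_eq, all_nodiv_iff, all_nodiv_iff]
    constructor
    · intro h m h2 hm hd
      have hp : n.Prime := Nat.prime_def_le_sqrt.mpr
        ⟨hn, fun m h2 hle => h m h2 (by omega)⟩
      exact (Nat.prime_def_lt'.mp hp).2 m h2 (by exact_mod_cast hm) hd
    · intro h m h2 hm hd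
      have hp : n.Prime := Nat.prime_def_lt'.mpr
        ⟨hn, fun m h2 hlt => h m h2 (by exact_mod_cast hlt)⟩
      have hle : m ≤ Nat.sqrt n := by
        have : (m : Int) ≤ (Nat.sqrt n : Int) := by omega
        exact_mod_cast this
      exact (Nat.prime_def_le_sqrt.mp hp).2 m h2 hle hd

-- main loop invariant: checkLoop equals B's computation, for any accumulator
theorem checkLoop_eq (cs : List Char) (s : Int)
    (hpre : ((cs.dropWhile (fun c => decide (c ∈ ['2', '3', '5', '7']))).take 1).all Char.isDigit = true) :
    checkLoop cs s =
      (if !(allPrimeDigit cs) then false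
       else
         let t := cs.foldl (fun acc x => acc + (PySem.Int.ofStr? (String.ofList [x])).getD 0) s
         if t < 2 then false else (PySem.List.pyRange 2 t 1).all (fun d => !(PySem.Int.mod t d == 0))) := by
  induction cs generalizing s with
  | nil =>
    simp only [checkLoop, allPrimeDigit, Bool.not_true, List.foldl_nil, Bool.false_eq_true,
      if_false]
    rw [is_prime_eq_full]
    split
    · rfl
    · rename_i h
      cases hb : (PySem.List.pyRange 2 s 1).all (fun d => !(PySem.Int.mod s d == 0)) <;>
        simp
  | cons c cs ih =>
    by_cases hc : c ∈ ['2', '3', '5', '7']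
    · obtain ⟨ho, hp, hm⟩ := prime_digit_val c hc
      have hdrop : (c :: cs).dropWhile (fun c => decide (c ∈ ['2', '3', '5', '7'])) =
          cs.dropWhile (fun c => decide (c ∈ ['2', '3', '5', '7'])) := by
        rw [List.dropWhile_cons_of_pos (by simpa using hc)]
      rw [hdrop] at hpre
      simp only [checkLoop, allPrimeDigit, ho, hp, Bool.not_true, List.foldl_cons,
        Option.getD_some, if_pos hm]
      exact ih (s + ((c.toNat : Int) - 48)) hpre
    · have hdrop : (c :: cs).dropWhile (fun c => decide (c ∈ ['2', '3', '5', '7'])) = c :: cs := by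
        rw [List.dropWhile_cons_of_neg (by simpa using hc)]
      rw [hdrop] at hpre
      have hdig : c.isDigit = true := by simpa using hpre
      obtain ⟨hnp, hnm⟩ := nonprime_digit c hdig hc
      simp only [checkLoop, allPrimeDigit, ofStr_digit c hdig, hnp, if_neg hnm]
      rfl

-- ===== VERDICT (by name: the statement is the Claim_ definition above) =====
theorem check_spec : Claim_equal_check := by
  intro num _ hpre
  unfold Spec_check check check_alt
  unfold Pre_check at hpre
  have hl : ("2357".toList) = ['2', '3', '5', '7'] := by decide
  simp only [hl] at hpre ⊢
  exact checkLoop_eq num.toList 0 hpre
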